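-- pv_equiv track=rewrite | github.com/FalconLi/2048_with_special_rules | allfunctions_2048.py | compress_up
-- ===== SOURCE A (Python) =====
-- def compress_up(board):
--     validity = False
--     new_board = [[0, 0, 0, 0], [0, 0, 0, 0], [0, 0, 0, 0], [0, 0, 0, 0]]
--     for i in range (4):
--         position = 0
--         for j in range (4):
--             if (board[j][i] != 0):
--                 new_board[position][i] = board[j][i]
--                 if j != position:
--                     validity = True
--                 position += 1
--     return new_board, validity
-- ===== SOURCE B (Python) =====
-- def compress_up(board):
--     def comp(col):
--         # recursively bubble each zero to the end, keeping nonzero order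
--         if not col:
--             return []
--         if col[0] == 0:
--             return comp(col[1:]) + [0]
--         return [col[0]] + comp(col[1:])
--
--     def moved(col):
--         # a tile moves in this column iff some nonzero sits below the first zero
--         return 0 in col and any(x != 0 for x in col[col.index(0):])
--
--     cols = [[board[j][i] for j in range(4)] for i in range(4)]
--     new_cols = [comp(c) for c in cols]
--     new_board = [[c[j] for c in new_cols] for j in range(4)]
--     return new_board, any(moved(c) for c in cols)
-- ===== Notes on version B (the rewrite author's own statement) =====
-- stated objective: alternative
-- what changed: Replaces A's write-pointer-and-flag loop into a zeroed grid by recursive zero-bubbling of each column (each zero is sent to the end recursively) plus a separate closed-form movement test (a nonzero below the first zero of the original column), assembled by transposition.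
import Mathlib
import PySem

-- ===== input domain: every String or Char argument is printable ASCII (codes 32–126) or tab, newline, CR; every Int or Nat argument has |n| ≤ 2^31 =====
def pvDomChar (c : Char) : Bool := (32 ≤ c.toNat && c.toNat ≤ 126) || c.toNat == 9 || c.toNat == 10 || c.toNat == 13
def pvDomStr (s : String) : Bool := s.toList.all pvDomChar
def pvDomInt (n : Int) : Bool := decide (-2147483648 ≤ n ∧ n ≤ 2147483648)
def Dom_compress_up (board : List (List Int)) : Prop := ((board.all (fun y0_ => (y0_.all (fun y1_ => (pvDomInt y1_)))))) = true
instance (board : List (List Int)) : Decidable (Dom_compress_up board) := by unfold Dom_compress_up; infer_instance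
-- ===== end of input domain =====

-- B replaces A's write-pointer-and-flag loop into a zeroed grid by recursive zero-bubbling of each
-- column plus a closed-form movement test (a nonzero below the first zero), assembled by transposition.

-- ===== PORT A =====
-- board[j][i]; exact on Pre_ (both indices in range there)
def pvCell (board : List (List Int)) (j i : Nat) : Int := (board.getD j []).getD i 0

-- the body of A's inner j-loop, one step
def pvStepA (board : List (List Int)) (i : Nat) (st2 : (List (List Int) × Bool) × Nat) (j : Nat) :
    (List (List Int) × Bool) × Nat :=
  if pvCell board j i ≠ 0 then
    ((st2.1.1.modify st2.2 (fun row => row.set i (pvCell board j i)),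
      st2.1.2 || decide (j ≠ st2.2)),
     st2.2 + 1)
  else st2

def compress_up (board : List (List Int)) : List (List Int) × Bool :=
  (List.range 4).foldl
    (fun st i => ((List.range 4).foldl (pvStepA board i) (st, 0)).1)
    ([[0,0,0,0],[0,0,0,0],[0,0,0,0],[0,0,0,0]], false)

-- ===== PORT B =====
-- recursive zero-bubbling: each zero is sent to the end, nonzero order preserved
def pvComp : List Int → List Int
  | [] => []
  | x :: rest => if x = 0 then pvComp rest ++ [0] else x :: pvComp rest

-- a tile moves in this column iff some nonzero sits below the first zero
def pvColMoved (c : List Int) : Bool :=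
  decide (0 ∈ c) && (c.drop (c.idxOf 0)).any (fun x => x ≠ 0)

def compress_up_alt (board : List (List Int)) : List (List Int) × Bool :=
  let cols := (List.range 4).map (fun i => (List.range 4).map (fun j => pvCell board j i))
  let newCols := cols.map pvComp
  ((List.range 4).map (fun j => newCols.map (fun c => c.getD j 0)),
   cols.any pvColMoved)

-- ===== PRECONDITION & SPEC =====
-- Pre_ excludes exactly the boards on which the Python A raises IndexError:
-- fewer than 4 rows, or one of the first 4 rows shorter than 4.
def Pre_compress_up (board : List (List Int)) : Prop :=
  4 ≤ board.length ∧ ∀ row ∈ board.take 4, 4 ≤ row.length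
instance (board : List (List Int)) : Decidable (Pre_compress_up board) := by
  unfold Pre_compress_up; infer_instance
def pvWitness_compress_up : List (List Int) :=
  [[0, 2, 0, 0], [0, 0, 0, 0], [2, 0, 4, 0], [0, 0, 4, 0]]
def Spec_compress_up (board : List (List Int)) (out : List (List Int) × Bool) : Prop := out = compress_up_alt board
instance (board : List (List Int)) (out : List (List Int) × Bool) : Decidable (Spec_compress_up board out) := by unfold Spec_compress_up; infer_instance

-- ===== CLAIM (what is proved, stated in full; the proofs are below) =====
def Claim_equal_compress_up : Prop := ∀ (board : List (List Int)), Dom_compress_up board → Pre_compress_up board → Spec_compress_up board (compress_up board)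

-- ===== LEMMAS AND PROOFS =====

-- One column of A's inner loop, over abstract rows whose i-th cell is zero,
-- equals writing B's bubbled column into the rows plus B's moved-flag.
set_option maxHeartbeats 2000000 in
lemma colStep (board : List (List Int)) (i : Nat) (r0 r1 r2 r3 : List Int) (valid : Bool)
    (h0 : r0.set i 0 = r0) (h1 : r1.set i 0 = r1) (h2 : r2.set i 0 = r2) (h3 : r3.set i 0 = r3) :
    (pvStepA board i (pvStepA board i (pvStepA board i (pvStepA board i
        (([r0, r1, r2, r3], valid), 0) 0) 1) 2) 3).1
    = ([r0.set i ((pvComp [pvCell board 0 i, pvCell board 1 i, pvCell board 2 i, pvCell board 3 i]).getD 0 0),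
        r1.set i ((pvComp [pvCell board 0 i, pvCell board 1 i, pvCell board 2 i, pvCell board 3 i]).getD 1 0),
        r2.set i ((pvComp [pvCell board 0 i, pvCell board 1 i, pvCell board 2 i, pvCell board 3 i]).getD 2 0),
        r3.set i ((pvComp [pvCell board 0 i, pvCell board 1 i, pvCell board 2 i, pvCell board 3 i]).getD 3 0)],
       valid || pvColMoved [pvCell board 0 i, pvCell board 1 i, pvCell board 2 i, pvCell board 3 i]) := by
  by_cases hA : pvCell board 0 i = 0 <;> by_cases hB : pvCell board 1 i = 0 <;>
    by_cases hC : pvCell board 2 i = 0 <;> by_cases hD : pvCell board 3 i = 0 <;>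
    simp [pvStepA, pvComp, pvColMoved, List.idxOf, List.findIdx, List.findIdx.go,
      cond_eq_if, beq_iff_eq, hA, hB, hC, hD, h0, h1, h2, h3, List.modify]

-- ===== VERDICT (by name: the statement is the Claim_ definition above) =====
set_option maxHeartbeats 4000000 in
theorem compress_up_spec : Claim_equal_compress_up := by
  intro board _ _
  show compress_up board = compress_up_alt board
  unfold compress_up compress_up_alt
  have hr : (List.range 4) = [0, 1, 2, 3] := rfl
  rw [hr]
  simp only [List.foldl_cons, List.foldl_nil, List.map_cons, List.map_nil, List.any_cons,
    List.any_nil]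
  rw [colStep board 0 _ _ _ _ _ rfl rfl rfl rfl,
      colStep board 1 _ _ _ _ _ rfl rfl rfl rfl,
      colStep board 2 _ _ _ _ _ rfl rfl rfl rfl,
      colStep board 3 _ _ _ _ _ rfl rfl rfl rfl]
  simp [List.set, Bool.or_assoc]
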